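-- pv_equiv track=rewrite | github.com/jovan196/Tubes3_PejuangCV | src/utils/cv2csv.py | generate_html_from_text
-- ===== SOURCE A (Python) =====
-- def generate_html_from_text(text, category):
--     """Generate basic HTML structure from extracted text"""
--     if not text:
--         return ""
--
--     # Split text into sections based on common CV patterns
--     sections = {}
--     current_section = "summary"
--     current_text = ""
--
--     lines = text.split('\n')
--
--     for line in lines:
--         line = line.strip()
--         if not line:
--             continue
--
--         # Detect section headers
--         line_lower = line.lower()
--         if any(keyword in line_lower for keyword in ['summary', 'objective', 'profile']):
--             if current_text:
--                 sections[current_section] = current_text.strip()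
--             current_section = "summary"
--             current_text = ""
--         elif any(keyword in line_lower for keyword in ['experience', 'work history', 'employment']):
--             if current_text:
--                 sections[current_section] = current_text.strip()
--             current_section = "experience"
--             current_text = ""
--         elif any(keyword in line_lower for keyword in ['education', 'academic']):
--             if current_text:
--                 sections[current_section] = current_text.strip()
--             current_section = "education"
--             current_text = ""
--         elif any(keyword in line_lower for keyword in ['skills', 'technical skills', 'competencies']):
--             if current_text:
--                 sections[current_section] = current_text.strip()
--             current_section = "skills"
--             current_text = ""
--         else:
--             current_text += " " + line
--
--     # Add the last section
--     if current_text: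
--         sections[current_section] = current_text.strip()
--
--     # Generate HTML structure
--     html_parts = ['<div class="fontsize fontface vmargins hmargins linespacing pagesize" id="document">']
--
--     # Name section
--     html_parts.append('<div class="section firstsection" id="SECTION_NAME" style="padding-top:0px;">')
--     html_parts.append('<div class="paragraph PARAGRAPH_NAME firstparagraph" style="padding-top:0px;">')
--     html_parts.append(f'<div class="name" itemprop="name"><span class="field">{category.replace("_", " ").title()}</span></div>')
--     html_parts.append('</div></div>')
--
--     # Summary section
--     if "summary" in sections:
--         html_parts.append('<div class="section" id="SECTION_SUMM" style="padding-top:0px;">')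
--         html_parts.append('<div class="heading"><div class="sectiontitle">Summary</div></div>')
--         html_parts.append('<div class="paragraph firstparagraph" style="padding-top:0px;">')
--         html_parts.append(f'<div class="field singlecolumn">{sections["summary"]}</div>')
--         html_parts.append('</div></div>')
--
--     # Experience section
--     if "experience" in sections:
--         html_parts.append('<div class="section" id="SECTION_EXPR" style="padding-top:0px;">')
--         html_parts.append('<div class="heading"><div class="sectiontitle">Experience</div></div>')
--         html_parts.append('<div class="paragraph firstparagraph" style="padding-top:0px;">')
--         html_parts.append(f'<div class="field singlecolumn">{sections["experience"]}</div>')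
--         html_parts.append('</div></div>')
--
--     # Education section
--     if "education" in sections:
--         html_parts.append('<div class="section" id="SECTION_EDUC" style="padding-top:0px;">')
--         html_parts.append('<div class="heading"><div class="sectiontitle">Education</div></div>')
--         html_parts.append('<div class="paragraph firstparagraph" style="padding-top:0px;">')
--         html_parts.append(f'<div class="field singlecolumn">{sections["education"]}</div>')
--         html_parts.append('</div></div>')
--
--     # Skills section
--     if "skills" in sections:
--         html_parts.append('<div class="section" id="SECTION_SKLL" style="padding-top:0px;">')
--         html_parts.append('<div class="heading"><div class="sectiontitle">Skills</div></div>')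
--         html_parts.append('<div class="paragraph firstparagraph" style="padding-top:0px;">')
--         html_parts.append(f'<div class="field singlecolumn">{sections["skills"]}</div>')
--         html_parts.append('</div></div>')
--
--     html_parts.append('</div>')
--
--     return ''.join(html_parts)
-- ===== SOURCE B (Python) =====
-- # Staged re-implementation: recursively split the cleaned line list at the first
-- # header line into (key, ' '.join(segment)) pairs, then build the dict at once
-- # with last-wins dict(); no running current_text/current_section state machine.
--
-- def _classify(line_lower):
--     if any(kw in line_lower for kw in ('summary', 'objective', 'profile')):
--         return 'summary'
--     if any(kw in line_lower for kw in ('experience', 'work history', 'employment')):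
--         return 'experience'
--     if any(kw in line_lower for kw in ('education', 'academic')):
--         return 'education'
--     if any(kw in line_lower for kw in ('skills', 'technical skills', 'competencies')):
--         return 'skills'
--     return None
--
--
-- def _split_sections(key, lines):
--     """Split at the first header line; return ordered (key, text) segment pairs."""
--     for j, line in enumerate(lines):
--         k = _classify(line.lower())
--         if k is not None:
--             head = lines[:j]
--             pairs = [(key, ' '.join(head))] if head else []
--             return pairs + _split_sections(k, lines[j + 1:])
--     return [(key, ' '.join(lines))] if lines else []
--
--
-- def generate_html_from_text(text, category):
--     if not text:
--         return ''
--     lines = [s for s in (raw.strip() for raw in text.split('\n')) if s]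
--     sections = dict(_split_sections('summary', lines))
--     name = category.replace('_', ' ').title()
--     parts = ['<div class="fontsize fontface vmargins hmargins linespacing pagesize" id="document">'
--              '<div class="section firstsection" id="SECTION_NAME" style="padding-top:0px;">'
--              '<div class="paragraph PARAGRAPH_NAME firstparagraph" style="padding-top:0px;">'
--              f'<div class="name" itemprop="name"><span class="field">{name}</span></div>'
--              '</div></div>']
--     for key, sec_id, title in (('summary', 'SECTION_SUMM', 'Summary'),
--                                ('experience', 'SECTION_EXPR', 'Experience'),
--                                ('education', 'SECTION_EDUC', 'Education'),
--                                ('skills', 'SECTION_SKLL', 'Skills')):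
--         if key in sections:
--             parts.append(f'<div class="section" id="{sec_id}" style="padding-top:0px;">'
--                          f'<div class="heading"><div class="sectiontitle">{title}</div></div>'
--                          '<div class="paragraph firstparagraph" style="padding-top:0px;">'
--                          f'<div class="field singlecolumn">{sections[key]}</div>'
--                          '</div></div>')
--     parts.append('</div>')
--     return ''.join(parts)
-- ===== Notes on version B (the rewrite author's own statement) =====
-- stated objective: alternative
-- what changed: A's single-pass mutable state machine (current_section/current_text accumulated line by line with flush-on-header) is replaced by staged passes: strip-and-filter the lines once, recursively split the list at the first header line into (key, ' '.join(segment)) pairs via slicing, and build the sections mapping in one shot with last-wins dict(pairs); the emitter is a loop over a fixed section table.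
import Mathlib
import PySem

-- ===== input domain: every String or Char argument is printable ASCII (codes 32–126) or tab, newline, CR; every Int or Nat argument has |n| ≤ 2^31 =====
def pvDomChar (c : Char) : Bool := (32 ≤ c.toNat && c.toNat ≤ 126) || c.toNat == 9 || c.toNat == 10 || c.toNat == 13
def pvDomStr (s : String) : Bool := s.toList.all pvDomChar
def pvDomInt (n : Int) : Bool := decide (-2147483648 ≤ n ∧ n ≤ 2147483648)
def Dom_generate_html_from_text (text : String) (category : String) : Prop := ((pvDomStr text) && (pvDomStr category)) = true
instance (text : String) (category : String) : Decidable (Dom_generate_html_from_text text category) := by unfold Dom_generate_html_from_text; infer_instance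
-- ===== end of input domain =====

-- B replaces A's one-pass current_section/current_text state machine by a staged
-- decomposition: clean the lines once, recursively split at the first header line
-- into (key, ' '.join(segment)) pairs, and build the dict at once (objective: alternative).

-- ===== PORT A =====
-- str.title() has no PySem primitive: ported by hand, exact on ASCII (a letter is upper-cased
-- after a non-letter, lower-cased after a letter — Python's word-boundary rule for ASCII text).
def pvTitleGo : Bool → List Char → List Char
  | _, [] => []
  | prev, c :: rest =>
      (if PySem.Chars.isalpha c then
        (if prev then PySem.Chars.lowerChar c else PySem.Chars.upperChar c)
       else c) :: pvTitleGo (PySem.Chars.isalpha c) rest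

def pvTitle (s : String) : String := String.ofList (pvTitleGo false s.toList)

-- `if current_text: sections[current_section] = current_text.strip()`
def pvFlush (sections : PySem.Dict String String) (cur txt : String) : PySem.Dict String String :=
  if txt == "" then sections else sections.insert cur (PySem.Str.strip txt)

-- the body of A's `for line in lines` loop, state = (sections, current_section, current_text)
def pvStepA (st : PySem.Dict String String × String × String) (rawLine : String) :
    PySem.Dict String String × String × String :=
  let line := PySem.Str.strip rawLine
  if line == "" then st
  else
    let ll := PySem.Str.lower line
    if ["summary", "objective", "profile"].any (fun kw => PySem.Str.isIn kw ll) then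
      (pvFlush st.1 st.2.1 st.2.2, "summary", "")
    else if ["experience", "work history", "employment"].any (fun kw => PySem.Str.isIn kw ll) then
      (pvFlush st.1 st.2.1 st.2.2, "experience", "")
    else if ["education", "academic"].any (fun kw => PySem.Str.isIn kw ll) then
      (pvFlush st.1 st.2.1 st.2.2, "education", "")
    else if ["skills", "technical skills", "competencies"].any (fun kw => PySem.Str.isIn kw ll) then
      (pvFlush st.1 st.2.1 st.2.2, "skills", "")
    else
      (st.1, st.2.1, st.2.2 ++ " " ++ line)

-- A's HTML emission: fixed header/name block, then one hand-written block per section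
def pvEmitA (sections : PySem.Dict String String) (category : String) : String :=
  PySem.Str.join "" (
    ["<div class=\"fontsize fontface vmargins hmargins linespacing pagesize\" id=\"document\">",
     "<div class=\"section firstsection\" id=\"SECTION_NAME\" style=\"padding-top:0px;\">",
     "<div class=\"paragraph PARAGRAPH_NAME firstparagraph\" style=\"padding-top:0px;\">",
     "<div class=\"name\" itemprop=\"name\"><span class=\"field\">" ++
       pvTitle (PySem.Str.replace category "_" " ") ++ "</span></div>",
     "</div></div>"]
    ++ (if sections.contains "summary" then
         ["<div class=\"section\" id=\"SECTION_SUMM\" style=\"padding-top:0px;\">",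
          "<div class=\"heading\"><div class=\"sectiontitle\">Summary</div></div>",
          "<div class=\"paragraph firstparagraph\" style=\"padding-top:0px;\">",
          "<div class=\"field singlecolumn\">" ++ ((sections.get? "summary").getD "") ++ "</div>",
          "</div></div>"] else [])
    ++ (if sections.contains "experience" then
         ["<div class=\"section\" id=\"SECTION_EXPR\" style=\"padding-top:0px;\">",
          "<div class=\"heading\"><div class=\"sectiontitle\">Experience</div></div>",
          "<div class=\"paragraph firstparagraph\" style=\"padding-top:0px;\">",
          "<div class=\"field singlecolumn\">" ++ ((sections.get? "experience").getD "") ++ "</div>",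
          "</div></div>"] else [])
    ++ (if sections.contains "education" then
         ["<div class=\"section\" id=\"SECTION_EDUC\" style=\"padding-top:0px;\">",
          "<div class=\"heading\"><div class=\"sectiontitle\">Education</div></div>",
          "<div class=\"paragraph firstparagraph\" style=\"padding-top:0px;\">",
          "<div class=\"field singlecolumn\">" ++ ((sections.get? "education").getD "") ++ "</div>",
          "</div></div>"] else [])
    ++ (if sections.contains "skills" then
         ["<div class=\"section\" id=\"SECTION_SKLL\" style=\"padding-top:0px;\">",
          "<div class=\"heading\"><div class=\"sectiontitle\">Skills</div></div>",
          "<div class=\"paragraph firstparagraph\" style=\"padding-top:0px;\">",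
          "<div class=\"field singlecolumn\">" ++ ((sections.get? "skills").getD "") ++ "</div>",
          "</div></div>"] else [])
    ++ ["</div>"])

def generate_html_from_text (text : String) (category : String) : String :=
  if text == "" then ""
  else
    let lines := (PySem.Str.split? text "\n").getD []
    let st := lines.foldl pvStepA (PySem.Dict.empty, "summary", "")
    pvEmitA (pvFlush st.1 st.2.1 st.2.2) category

-- ===== PORT B =====
-- Source B's _classify: which section key (if any) a lowercased line is a header for
def pvClassify (ll : String) : Option String :=
  if ["summary", "objective", "profile"].any (fun kw => PySem.Str.isIn kw ll) then some "summary"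
  else if ["experience", "work history", "employment"].any (fun kw => PySem.Str.isIn kw ll) then some "experience"
  else if ["education", "academic"].any (fun kw => PySem.Str.isIn kw ll) then some "education"
  else if ["skills", "technical skills", "competencies"].any (fun kw => PySem.Str.isIn kw ll) then some "skills"
  else none

-- Source B's _split_sections: find the first header line, emit (key, ' '.join(head)) for a
-- non-empty head segment, recurse on the remainder with the new key
def pvSplitSections (key : String) (lines : List String) : List (String × String) :=
  match h : lines.findIdx? (fun l => (pvClassify (PySem.Str.lower l)).isSome) with
  | some j =>
      let head := lines.take j
      let k := (pvClassify (PySem.Str.lower (lines.getD j ""))).getD ""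
      (if head.isEmpty then [] else [(key, PySem.Str.join " " head)]) ++
        pvSplitSections k (lines.drop (j + 1))
  | none => if lines.isEmpty then [] else [(key, PySem.Str.join " " lines)]
termination_by lines.length
decreasing_by
  have hj : j < lines.length := (List.findIdx?_eq_some_iff_getElem.mp h).1
  simp only [List.length_drop]
  omega

-- `[s for s in (raw.strip() for raw in text.split('\n')) if s]`
def pvCleanLines (text : String) : List String :=
  (((PySem.Str.split? text "\n").getD []).map PySem.Str.strip).filter (fun s => s != "")

def pvTableB : List (String × String × String) :=
  [("summary", "SECTION_SUMM", "Summary"),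
   ("experience", "SECTION_EXPR", "Experience"),
   ("education", "SECTION_EDUC", "Education"),
   ("skills", "SECTION_SKLL", "Skills")]

-- Source B's emitter: fixed name block, then one block per table row whose key is present
def pvEmitB (sections : PySem.Dict String String) (category : String) : String :=
  PySem.Str.join "" (
    ["<div class=\"fontsize fontface vmargins hmargins linespacing pagesize\" id=\"document\">" ++
     "<div class=\"section firstsection\" id=\"SECTION_NAME\" style=\"padding-top:0px;\">" ++
     "<div class=\"paragraph PARAGRAPH_NAME firstparagraph\" style=\"padding-top:0px;\">" ++
     "<div class=\"name\" itemprop=\"name\"><span class=\"field\">" ++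
       pvTitle (PySem.Str.replace category "_" " ") ++ "</span></div>" ++
     "</div></div>"]
    ++ pvTableB.filterMap (fun e =>
        if sections.contains e.1 then
          some ("<div class=\"section\" id=\"" ++ e.2.1 ++ "\" style=\"padding-top:0px;\">" ++
                "<div class=\"heading\"><div class=\"sectiontitle\">" ++ e.2.2 ++ "</div></div>" ++
                "<div class=\"paragraph firstparagraph\" style=\"padding-top:0px;\">" ++
                "<div class=\"field singlecolumn\">" ++ ((sections.get? e.1).getD "") ++ "</div>" ++
                "</div></div>")
        else none)
    ++ ["</div>"])

def generate_html_from_text_alt (text : String) (category : String) : String :=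
  if text == "" then ""
  else
    let lines := pvCleanLines text
    let sections := PySem.Dict.ofList (pvSplitSections "summary" lines)
    pvEmitB sections category

-- ===== PRECONDITION & SPEC =====
def Spec_generate_html_from_text (text : String) (category : String) (out : String) : Prop := out = generate_html_from_text_alt text category
instance (text : String) (category : String) (out : String) : Decidable (Spec_generate_html_from_text text category out) := by unfold Spec_generate_html_from_text; infer_instance

-- ===== CLAIM (what is proved, stated in full; the proofs are below) =====
def Claim_equal_generate_html_from_text : Prop := ∀ (text : String) (category : String), Dom_generate_html_from_text text category → Spec_generate_html_from_text text category (generate_html_from_text text category)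

-- ===== LEMMAS AND PROOFS =====

-- abbreviations used only by the proofs
def pvC (l : String) : Prop := PySem.Str.strip l = l ∧ l ≠ ""

def pvTxt (acc : List String) : String := acc.foldl (fun t l => t ++ " " ++ l) ""

def pvFinal (st : PySem.Dict String String × String × String) : PySem.Dict String String :=
  pvFlush st.1 st.2.1 st.2.2

def pvInsAll (d : PySem.Dict String String) (ps : List (String × String)) : PySem.Dict String String :=
  ps.foldl (fun acc p => acc.insert p.1 p.2) d

-- structural-recursive reference form of Source B's splitter (proof-side only)
def pvSegs (k : String) (acc : List String) : List String → List (String × String)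
  | [] => if acc.isEmpty then [] else [(k, PySem.Str.join " " acc)]
  | l :: ls =>
    match pvClassify (PySem.Str.lower l) with
    | some k' => (if acc.isEmpty then [] else [(k, PySem.Str.join " " acc)]) ++ pvSegs k' [] ls
    | none => pvSegs k (acc ++ [l]) ls

-- ---- strip facts (char level) ----

theorem pv_head_lstrip {s : List Char} {c : Char} {cs : List Char}
    (h : PySem.Chars.lstrip s = c :: cs) : PySem.Chars.isspace c = false := by
  have := List.head?_dropWhile_not PySem.Chars.isspace s
  unfold PySem.Chars.lstrip at h
  rw [h] at this
  simpa using this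

theorem pv_rstrip_rstrip (s : List Char) :
    PySem.Chars.rstrip (PySem.Chars.rstrip s) = PySem.Chars.rstrip s := by
  unfold PySem.Chars.rstrip
  rw [List.reverse_reverse]
  congr 1
  rcases h : List.dropWhile PySem.Chars.isspace s.reverse with _ | ⟨c, cs⟩
  · simp
  · have := List.head?_dropWhile_not PySem.Chars.isspace s.reverse
    rw [h] at this
    simp only [List.head?_cons] at this
    simp [List.dropWhile_cons, this]

theorem pv_rstrip_prefix (s : List Char) : PySem.Chars.rstrip s <+: s := by
  unfold PySem.Chars.rstrip
  have := List.dropWhile_suffix (l := s.reverse) PySem.Chars.isspace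
  have h2 := List.reverse_prefix.mpr this
  simpa using h2

theorem pv_strip_strip (s : List Char) :
    PySem.Chars.strip (PySem.Chars.strip s) = PySem.Chars.strip s := by
  unfold PySem.Chars.strip
  have h1 : PySem.Chars.lstrip (PySem.Chars.rstrip (PySem.Chars.lstrip s)) =
      PySem.Chars.rstrip (PySem.Chars.lstrip s) := by
    rcases hr : PySem.Chars.rstrip (PySem.Chars.lstrip s) with _ | ⟨c, cs⟩
    · simp [PySem.Chars.lstrip]
    · obtain ⟨t, ht⟩ := pv_rstrip_prefix (PySem.Chars.lstrip s)
      rw [hr] at ht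
      have hc : PySem.Chars.isspace c = false := pv_head_lstrip ht.symm
      simp [PySem.Chars.lstrip, List.dropWhile_cons, hc]
  rw [h1, pv_rstrip_rstrip]

theorem pv_strip_eq_self {s : List Char} (h : PySem.Chars.strip s = s) :
    PySem.Chars.lstrip s = s ∧ PySem.Chars.rstrip s = s := by
  have hls : PySem.Chars.lstrip s <:+ s := List.dropWhile_suffix _
  have hlen1 : (PySem.Chars.strip s).length ≤ (PySem.Chars.lstrip s).length := by
    unfold PySem.Chars.strip PySem.Chars.rstrip
    have := (List.dropWhile_suffix (l := (PySem.Chars.lstrip s).reverse) PySem.Chars.isspace).length_le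
    simpa using this
  have hlen2 : (PySem.Chars.lstrip s).length ≤ s.length := hls.length_le
  have hl : PySem.Chars.lstrip s = s := hls.eq_of_length (by rw [h] at hlen1; omega)
  refine ⟨hl, ?_⟩
  have : PySem.Chars.strip s = PySem.Chars.rstrip s := by unfold PySem.Chars.strip; rw [hl]
  rw [← this, h]

-- dropWhile over an append whose left part survives
theorem pv_dropWhile_append_left {p : Char → Bool} {xs : List Char} (ys : List Char)
    (h : List.dropWhile p xs = xs) (hne : xs ≠ []) :
    List.dropWhile p (xs ++ ys) = xs ++ ys := by
  rcases xs with _ | ⟨c, cs⟩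
  · exact absurd rfl hne
  · have hc : p c = false := by
      by_contra hc
      simp only [Bool.not_eq_false] at hc
      rw [List.dropWhile_cons, if_pos hc] at h
      have := (List.dropWhile_suffix (l := cs) p).length_le
      rw [h] at this
      simp at this
    simp [List.dropWhile_cons, hc]

-- intercalate of clean nonempty pieces is itself clean
theorem pv_intercalate_clean : ∀ (xs : List (List Char)), xs ≠ [] →
    (∀ x ∈ xs, x ≠ [] ∧ PySem.Chars.lstrip x = x ∧ PySem.Chars.rstrip x = x) →
    ([' '].intercalate xs ≠ [] ∧
     PySem.Chars.lstrip ([' '].intercalate xs) = [' '].intercalate xs ∧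
     PySem.Chars.rstrip ([' '].intercalate xs) = [' '].intercalate xs)
  | [], h, _ => absurd rfl h
  | [x], _, hc => by
      have := hc x (by simp)
      simpa [List.intercalate] using this
  | x :: y :: xs, _, hc => by
      have hx := hc x (by simp)
      have ih := pv_intercalate_clean (y :: xs) (by simp)
        (fun z hz => by simpa using hc z (List.mem_cons_of_mem x hz))
      have hIc : [' '].intercalate (x :: y :: xs) = x ++ ' ' :: [' '].intercalate (y :: xs) := by
        simp [List.intercalate, List.intersperse]
      obtain ⟨hIne, hIl, hIr⟩ := ih
      refine ⟨by rw [hIc]; simp [hx.1], ?_, ?_⟩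
      · rw [hIc]
        exact pv_dropWhile_append_left _ hx.2.1 hx.1
      · rw [hIc]
        have hrevdrop : List.dropWhile PySem.Chars.isspace ([' '].intercalate (y :: xs)).reverse
            = ([' '].intercalate (y :: xs)).reverse := by
          have := congrArg List.reverse hIr
          unfold PySem.Chars.rstrip at this
          simpa using this
        have hrev : (x ++ ' ' :: [' '].intercalate (y :: xs)).reverse =
            ([' '].intercalate (y :: xs)).reverse ++ (' ' :: x.reverse) := by
          simp
        unfold PySem.Chars.rstrip
        rw [hrev, pv_dropWhile_append_left _ hrevdrop (by simpa using hIne)]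
        simp

-- flatten (map (' ' :: ·) xs) = ' ' :: intercalate [' '] xs  for xs ≠ []
theorem pv_flatten_eq_intercalate : ∀ (xs : List (List Char)), xs ≠ [] →
    (xs.map (fun x => ' ' :: x)).flatten = ' ' :: [' '].intercalate xs
  | [], h => absurd rfl h
  | [x], _ => by simp [List.intercalate]
  | x :: y :: xs, _ => by
      have ih := pv_flatten_eq_intercalate (y :: xs) (by simp)
      have hIc : [' '].intercalate (x :: y :: xs) = x ++ ' ' :: [' '].intercalate (y :: xs) := by
        simp [List.intercalate, List.intersperse]
      simp only [List.map_cons, List.flatten_cons] at ih ⊢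
      rw [ih, hIc]
      simp

-- main strip-of-joined-segment lemma, char level
theorem pv_strip_flat (xs : List (List Char)) (hne : xs ≠ [])
    (hc : ∀ x ∈ xs, x ≠ [] ∧ PySem.Chars.strip x = x) :
    PySem.Chars.strip ((xs.map (fun x => ' ' :: x)).flatten) = [' '].intercalate xs := by
  have hc' : ∀ x ∈ xs, x ≠ [] ∧ PySem.Chars.lstrip x = x ∧ PySem.Chars.rstrip x = x :=
    fun x hx => ⟨(hc x hx).1, pv_strip_eq_self (hc x hx).2⟩
  obtain ⟨hIne, hIl, hIr⟩ := pv_intercalate_clean xs hne hc'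
  rw [pv_flatten_eq_intercalate xs hne]
  unfold PySem.Chars.strip
  have : PySem.Chars.lstrip (' ' :: [' '].intercalate xs) = [' '].intercalate xs := by
    unfold PySem.Chars.lstrip at hIl ⊢
    simp only [List.dropWhile_cons]
    have : PySem.Chars.isspace ' ' = true := by decide
    rw [if_pos this, hIl]
  rw [this, hIr]

-- ---- String-level consequences ----

theorem pv_str_strip_strip (s : String) : PySem.Str.strip (PySem.Str.strip s) = PySem.Str.strip s := by
  rw [← String.toList_inj]
  simp only [PySem.Str.toList_strip]
  exact pv_strip_strip s.toList

theorem pv_txt_toList : ∀ (acc : List String) (t : String),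
    (acc.foldl (fun t l => t ++ " " ++ l) t).toList
      = t.toList ++ (acc.map (fun l => ' ' :: l.toList)).flatten
  | [], t => by simp
  | l :: ls, t => by
      simp only [List.foldl_cons, List.map_cons, List.flatten_cons]
      rw [pv_txt_toList ls (t ++ " " ++ l)]
      simp [String.toList_append]

theorem pv_strip_txt (acc : List String) (hne : acc ≠ []) (hc : ∀ l ∈ acc, pvC l) :
    PySem.Str.strip (pvTxt acc) = PySem.Str.join " " acc ∧ pvTxt acc ≠ "" := by
  have hlist : (pvTxt acc).toList = (acc.map (fun l => ' ' :: l.toList)).flatten := by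
    unfold pvTxt
    rw [pv_txt_toList]
    simp
  have hxs : ∀ x ∈ acc.map String.toList, x ≠ [] ∧ PySem.Chars.strip x = x := by
    intro x hx
    simp only [List.mem_map] at hx
    obtain ⟨l, hl, rfl⟩ := hx
    obtain ⟨hs, hne'⟩ := hc l hl
    constructor
    · intro h0
      apply hne'
      rw [← String.toList_inj]
      simpa using h0
    · have := congrArg String.toList hs
      simpa [PySem.Str.toList_strip] using this
  have hmapne : acc.map String.toList ≠ [] := by simpa using hne
  constructor
  · rw [← String.toList_inj]
    rw [PySem.Str.toList_strip, hlist]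
    have : acc.map (fun l => ' ' :: l.toList) = (acc.map String.toList).map (fun x => ' ' :: x) := by
      simp [List.map_map]
    rw [this, pv_strip_flat _ hmapne hxs]
    rw [PySem.Str.toList_join]
    rfl
  · intro h0
    have := congrArg String.toList h0
    rw [hlist] at this
    rcases acc with _ | ⟨l, ls⟩
    · exact hne rfl
    · simp at this

-- ---- fold over raw lines = fold over cleaned lines ----

theorem pv_stepA_empty (st : PySem.Dict String String × String × String) (r : String)
    (h : PySem.Str.strip r = "") : pvStepA st r = st := by
  unfold pvStepA
  simp [h]

theorem pv_stepA_strip (st : PySem.Dict String String × String × String) (r : String) :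
    pvStepA st (PySem.Str.strip r) = pvStepA st r := by
  conv_lhs => unfold pvStepA
  conv_rhs => unfold pvStepA
  rw [pv_str_strip_strip]

theorem pv_fold_clean : ∀ (raws : List String) (st : PySem.Dict String String × String × String),
    raws.foldl pvStepA st
      = ((raws.map PySem.Str.strip).filter (fun s => s != "")).foldl pvStepA st
  | [], st => rfl
  | r :: rs, st => by
      simp only [List.foldl_cons, List.map_cons, List.filter_cons]
      by_cases h : PySem.Str.strip r = ""
      · rw [pv_stepA_empty st r h]
        have he : (PySem.Str.strip r != "") = false := by simp [h]
        simp only [he, Bool.false_eq_true, if_false]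
        exact pv_fold_clean rs st
      · have ht : (PySem.Str.strip r != "") = true := by simpa using h
        simp only [ht, if_true, List.foldl_cons]
        rw [pv_stepA_strip st r]
        exact pv_fold_clean rs (pvStepA st r)

theorem pv_clean_mem (text : String) : ∀ l ∈ pvCleanLines text, pvC l := by
  intro l hl
  unfold pvCleanLines at hl
  simp only [List.mem_filter, List.mem_map] at hl
  obtain ⟨⟨r, _, rfl⟩, hne⟩ := hl
  exact ⟨pv_str_strip_strip r, by simpa using hne⟩

-- ---- A's loop body on a cleaned line, phrased through pvClassify ----

theorem pv_stepA_classify (st : PySem.Dict String String × String × String) (l : String)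
    (hc : pvC l) :
    pvStepA st l = match pvClassify (PySem.Str.lower l) with
      | some k => (pvFlush st.1 st.2.1 st.2.2, k, "")
      | none => (st.1, st.2.1, st.2.2 ++ " " ++ l) := by
  obtain ⟨hs, hne⟩ := hc
  unfold pvStepA pvClassify
  rw [hs]
  have hbe : (l == "") = false := by simpa using hne
  simp only [hbe, Bool.false_eq_true, if_false]
  split_ifs <;> rfl

-- ---- A's fold + final flush = insert-all of pvSegs ----

theorem pv_fold_segs : ∀ (L : List String), ∀ (k : String) (d : PySem.Dict String String)
    (acc : List String), (∀ l ∈ L, pvC l) → (∀ l ∈ acc, pvC l) →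
    pvFinal (L.foldl pvStepA (d, k, pvTxt acc)) = pvInsAll d (pvSegs k acc L) := by
  intro L
  induction L with
  | nil =>
      intro k d acc _ hacc
      rcases h : acc with _ | ⟨a, as⟩
      · simp [pvFinal, pvFlush, pvSegs, pvInsAll, pvTxt]
      · rw [← h]
        have hne : acc ≠ [] := by simp [h]
        obtain ⟨hstrip, htxt⟩ := pv_strip_txt acc hne hacc
        have hbe : (pvTxt acc == "") = false := by simpa using htxt
        have hemp : acc.isEmpty = false := by simpa using hne
        simp only [List.foldl_nil, pvFinal, pvFlush, pvSegs, hbe, hemp, Bool.false_eq_true,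
          if_false, hstrip]
        simp [pvInsAll]
  | cons l ls ih =>
      intro k d acc hL hacc
      have hl := hL l (by simp)
      have hls : ∀ x ∈ ls, pvC x := fun x hx => hL x (by simp [hx])
      simp only [List.foldl_cons]
      rw [pv_stepA_classify (d, k, pvTxt acc) l hl]
      rcases hcl : pvClassify (PySem.Str.lower l) with _ | k'
      · -- body line: extend the accumulator
        have hext : pvTxt acc ++ " " ++ l = pvTxt (acc ++ [l]) := by
          unfold pvTxt
          rw [List.foldl_append]
          simp
        simp only [hext]
        rw [ih k d (acc ++ [l]) hls
          (by intro x hx; rcases List.mem_append.mp hx with h | h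
              · exact hacc x h
              · simp at h; subst h; exact hl)]
        simp [pvSegs, hcl]
      · -- header line: flush and restart
        have hflush : pvFlush d k (pvTxt acc) =
            pvInsAll d (if acc.isEmpty then [] else [(k, PySem.Str.join " " acc)]) := by
          rcases h : acc with _ | ⟨a, as⟩
          · simp [pvFlush, pvInsAll, pvTxt]
          · rw [← h]
            have hne : acc ≠ [] := by simp [h]
            obtain ⟨hstrip, htxt⟩ := pv_strip_txt acc hne hacc
            have hbe : (pvTxt acc == "") = false := by simpa using htxt
            have hemp : acc.isEmpty = false := by simpa using hne
            unfold pvFlush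
            simp only [hbe, hemp, Bool.false_eq_true, if_false, hstrip]
            simp [pvInsAll]
        have hemp : ("" : String) = pvTxt [] := rfl
        rw [hemp, ih k' (pvFlush d k (pvTxt acc)) [] hls (by simp)]
        simp only [pvSegs, hcl]
        rw [hflush]
        unfold pvInsAll
        rw [List.foldl_append]
theorem pv_segs_nohdr : ∀ (L acc : List String) (k : String),
    (∀ l ∈ L, pvClassify (PySem.Str.lower l) = none) →
    pvSegs k acc L = if (acc ++ L).isEmpty then [] else [(k, PySem.Str.join " " (acc ++ L))] := by
  intro L
  induction L with
  | nil => intro acc k _; simp [pvSegs]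
  | cons l ls ihl =>
      intro acc k h
      have hl := h l (by simp)
      simp only [pvSegs, hl]
      rw [ihl (acc ++ [l]) k (fun x hx => h x (by simp [hx]))]
      simp

theorem pv_segs_hdr : ∀ (head : List String) (acc : List String) (k h k' : String)
    (rest : List String),
    (∀ l ∈ head, pvClassify (PySem.Str.lower l) = none) →
    pvClassify (PySem.Str.lower h) = some k' →
    pvSegs k acc (head ++ h :: rest)
      = (if (acc ++ head).isEmpty then [] else [(k, PySem.Str.join " " (acc ++ head))]) ++
        pvSegs k' [] rest := by
  intro head
  induction head with
  | nil =>
      intro acc k h k' rest _ hh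
      simp [pvSegs, hh]
  | cons l hs ihh =>
      intro acc k h k' rest hhead hh
      have hl := hhead l (by simp)
      simp only [List.cons_append, pvSegs, hl]
      rw [ihh (acc ++ [l]) k h k' rest (fun x hx => hhead x (by simp [hx])) hh]
      simp

theorem pv_split_eq_segs_aux : ∀ (n : Nat) (L : List String) (k : String), L.length ≤ n →
    pvSplitSections k L = pvSegs k [] L := by
  intro n
  induction n with
  | zero =>
      intro L k hL
      have : L = [] := List.eq_nil_of_length_eq_zero (by omega)
      subst this
      simp [pvSplitSections, pvSegs]
  | succ n ih =>
      intro L k hL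
      unfold pvSplitSections
      split
      · rename_i j hf
        dsimp only
        obtain ⟨hj, hpj, hlt⟩ := List.findIdx?_eq_some_iff_getElem.mp hf
        rcases hcj : pvClassify (PySem.Str.lower L[j]) with _ | k'
        · rw [hcj] at hpj; simp at hpj
        have hgetD : L.getD j "" = L[j] := List.getD_eq_getElem L "" hj
        have hheadnone : ∀ l ∈ L.take j, pvClassify (PySem.Str.lower l) = none := by
          intro l hl
          obtain ⟨i, hi, hil⟩ := List.mem_iff_getElem.mp hl
          have hij : i < j := by
            have := hi; simp only [List.length_take] at this; omega
          have := hlt i hij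
          rw [← hil, List.getElem_take]
          simpa using this
        have hrec : pvSplitSections ((pvClassify (PySem.Str.lower (L.getD j ""))).getD "")
            (L.drop (j + 1)) = pvSegs k' [] (L.drop (j + 1)) := by
          rw [hgetD, hcj]
          simp only [Option.getD_some]
          exact ih (L.drop (j + 1)) k' (by simp [List.length_drop]; omega)
        rw [hrec]
        conv_rhs => rw [show L = L.take j ++ L[j] :: L.drop (j + 1) by
          conv_lhs => rw [← List.take_append_drop j L]
          rw [List.drop_eq_getElem_cons hj]]
        rw [pv_segs_hdr (L.take j) [] k L[j] k' (L.drop (j + 1)) hheadnone hcj]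
        simp
      · rename_i hf
        have hnone : ∀ l ∈ L, pvClassify (PySem.Str.lower l) = none := by
          intro l hl
          have := List.findIdx?_eq_none_iff.mp hf l hl
          simpa using this
        rw [pv_segs_nohdr L [] k hnone]
        simp

theorem pv_split_eq_segs (L : List String) (k : String) :
    pvSplitSections k L = pvSegs k [] L :=
  pv_split_eq_segs_aux L.length L k le_rfl

-- ---- emitters agree on equal dicts ----

set_option maxRecDepth 8000 in
set_option maxHeartbeats 2000000 in
theorem pv_emit_eq (s : PySem.Dict String String) (c : String) : pvEmitB s c = pvEmitA s c := by
  rw [← String.toList_inj]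
  simp only [pvEmitB, pvEmitA, pvTableB, List.filterMap_cons, List.filterMap_nil]
  by_cases h1 : s.contains "summary" <;>
  by_cases h2 : s.contains "experience" <;>
  by_cases h3 : s.contains "education" <;>
  by_cases h4 : s.contains "skills" <;>
  simp only [h1, h2, h3, h4, if_true, if_false, Bool.false_eq_true, List.nil_append, List.append_nil, List.cons_append] <;>
  simp [PySem.Str.toList_join, PySem.Chars.join_cons_cons, PySem.Chars.join_singleton,
    String.toList_append, List.append_assoc]

-- ===== VERDICT (by name: the statement is the Claim_ definition above) =====
theorem generate_html_from_text_spec : Claim_equal_generate_html_from_text := by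
  intro text category _
  unfold Spec_generate_html_from_text
  unfold generate_html_from_text generate_html_from_text_alt
  by_cases ht : (text == "") = true
  · rw [if_pos ht, if_pos ht]
  · have ht' : (text == "") = false := by simpa using ht
    simp only [ht', Bool.false_eq_true, if_false]
    rw [pv_emit_eq]
    congr 1
    have hfold := pv_fold_clean ((PySem.Str.split? text "\n").getD [])
      (PySem.Dict.empty, "summary", "")
    have hclean : ((((PySem.Str.split? text "\n").getD []).map PySem.Str.strip).filter
        (fun s => s != "")) = pvCleanLines text := rfl
    rw [hfold, hclean]
    have hmem := pv_clean_mem text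
    have hmain := pv_fold_segs (pvCleanLines text) "summary" PySem.Dict.empty [] hmem (by simp)
    have htxt0 : pvTxt [] = "" := rfl
    rw [htxt0] at hmain
    rw [show (pvFlush ((pvCleanLines text).foldl pvStepA (PySem.Dict.empty, "summary", "")).1
          ((pvCleanLines text).foldl pvStepA (PySem.Dict.empty, "summary", "")).2.1
          ((pvCleanLines text).foldl pvStepA (PySem.Dict.empty, "summary", "")).2.2)
        = pvFinal ((pvCleanLines text).foldl pvStepA (PySem.Dict.empty, "summary", "")) from rfl]
    rw [hmain, pv_split_eq_segs]
    rfl
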